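-- pv_equiv track=rewrite | github.com/CISPA-SysSec/mua_fuzzer_bench | eval.py | reachability_matrix
-- ===== SOURCE A (Python) =====
-- def find_reachable(call_g, fnA, reachable_keys=None, found_so_far=None):
--     if reachable_keys is None: reachable_keys = {}
--     if found_so_far is None: found_so_far = set()
--
--     for fnB in call_g[fnA]:
--         if fnB in found_so_far: continue
--         found_so_far.add(fnB)
--         if fnB not in call_g: continue
--         if fnB in reachable_keys:
--             for k in reachable_keys[fnB]:
--                 found_so_far.add(k)
--         else:
--             keys = find_reachable(call_g, fnB, reachable_keys, found_so_far)
--     return found_so_far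
--
-- def reachable_dict(call_g):
--     reachable = {}
--     for fnA in call_g:
--         keys = find_reachable(call_g, fnA, reachable)
--         reachable[fnA] = keys
--     return reachable
--
-- def reachability_matrix(call_g):
--     reachability = reachable_dict(call_g)
--     rows = list(reachability.keys())
--     columns = list(reachability.keys())
--     matrix = []
--     for i in rows:
--         matrix_row = []
--         for j in columns:
--             matrix_row.append(1 if i in reachability[j] or j in reachability[i] or i == j else 0)
--             #matrix_row.append(1 if i in reachability[j] or i == j else 0)
--         matrix.append(matrix_row)
--     return matrix, columns
-- ===== SOURCE B (Python) =====
-- def reachability_matrix(call_g):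
--     # iterative worklist per key instead of recursive memoized DFS; no memo dict
--     reach = {}
--     for a in call_g:
--         seen = set()
--         work = list(call_g[a])
--         while work:
--             b = work.pop(0)
--             if b in seen:
--                 continue
--             seen.add(b)
--             if b in call_g:
--                 work.extend(call_g[b])
--         reach[a] = seen
--     keys = list(call_g)
--     matrix = [[1 if i == j or i in reach[j] or j in reach[i] else 0 for j in keys]
--               for i in keys]
--     return matrix, keys
-- ===== Notes on version B (the rewrite author's own statement) =====
-- stated objective: simpler
-- what changed: Replaces the recursive memoized DFS (shared mutable found-set plus a memo dict of earlier results) with a plain iterative worklist loop per key, and the nested append loops with a comprehension-style matrix build.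
import Mathlib
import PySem

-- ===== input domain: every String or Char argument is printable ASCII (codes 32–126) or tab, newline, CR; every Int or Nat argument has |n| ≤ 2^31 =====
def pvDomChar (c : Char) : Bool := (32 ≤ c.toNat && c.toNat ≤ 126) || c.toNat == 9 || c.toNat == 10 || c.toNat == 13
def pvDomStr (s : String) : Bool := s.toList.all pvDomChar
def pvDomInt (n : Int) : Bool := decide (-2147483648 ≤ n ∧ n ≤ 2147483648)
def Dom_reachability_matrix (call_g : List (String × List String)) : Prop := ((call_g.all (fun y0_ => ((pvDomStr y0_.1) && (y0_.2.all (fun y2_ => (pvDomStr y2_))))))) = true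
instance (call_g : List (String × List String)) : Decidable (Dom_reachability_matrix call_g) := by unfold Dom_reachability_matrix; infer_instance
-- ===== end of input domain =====

-- B replaces A's recursive memoized DFS and nested append loops by a plain
-- per-key worklist loop and a comprehension-style matrix build (objective:
-- simpler; same asymptotic cost).

-- ===== PORT A =====
-- find_reachable: the recursive DFS over a successor list, with the memo dict
-- (`reachable_keys`) and the growing set (`found_so_far`, threaded through the
-- recursion exactly as the Python mutates it).  The Python recursion
-- terminates because each nested call marks a fresh key first; here that is a
-- fuel argument, consumed only at nested calls and started at the key count
-- (lemma `findReach_complete` below shows the 0-fuel branch is never reached).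

def findReach (d : PySem.Dict String (List String)) (fuel : Nat) (L : List String)
    (memo : PySem.Dict String (PySem.Set String)) (found : PySem.Set String) :
    PySem.Set String :=
  match L with
  | [] => found
  | b :: rest =>
    if PySem.Set.contains found b then findReach d fuel rest memo found
    else
      if d.contains b then
        match memo.get? b with
        | some s => findReach d fuel rest memo (PySem.Set.update (PySem.Set.add found b) s)
        | none =>
          match fuel with
          | 0 => PySem.Set.add found b
          | f + 1 =>
            findReach d (f + 1) rest memo (findReach d f (d.getD b []) memo (PySem.Set.add found b))
      else findReach d fuel rest memo (PySem.Set.add found b)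
termination_by (fuel, L.length)
decreasing_by all_goals simp_wf; omega


-- reachable_dict: fold over the keys in insertion order, storing each key's set.

def reachDict (d : PySem.Dict String (List String)) :
    PySem.Dict String (PySem.Set String) :=
  d.keys.foldl
    (fun memo a => memo.insert a (findReach d d.size (d.getD a []) memo PySem.Set.empty))
    PySem.Dict.empty


-- reachability_matrix: the nested append loops over rows and columns.

def reachability_matrix (call_g : List (String × List String)) : List (List Int) × List String :=
  ((reachDict (PySem.Dict.ofList call_g)).keys.foldl
    (fun m i =>
      m ++ [(reachDict (PySem.Dict.ofList call_g)).keys.foldl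
        (fun row j =>
          row ++ [if PySem.Set.contains ((reachDict (PySem.Dict.ofList call_g)).getD j PySem.Set.empty) i
                     || PySem.Set.contains ((reachDict (PySem.Dict.ofList call_g)).getD i PySem.Set.empty) j
                     || i == j then (1 : Int) else 0]) []]) [],
   (reachDict (PySem.Dict.ofList call_g)).keys)


-- ===== PORT B =====
-- The worklist loop of Source B: pop the front of `work`, skip if already seen,
-- mark it, and extend the worklist with its successors when it is a key.
-- Pops are bounded by the initial work length plus the total successor-list
-- length, which is the fuel `bDict` passes in (never exhausted, see
-- `bReach_complete`).

def bReach (d : PySem.Dict String (List String)) (fuel : Nat) (work : List String)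
    (seen : PySem.Set String) : PySem.Set String :=
  match fuel, work with
  | _, [] => seen
  | 0, _ => seen
  | f + 1, b :: work' =>
    if PySem.Set.contains seen b then bReach d f work' seen
    else
      if d.contains b then bReach d f (work' ++ d.getD b []) (PySem.Set.add seen b)
      else bReach d f work' (PySem.Set.add seen b)


-- the `reach` dict of Source B, built key by key (no memoization)

def bDict (d : PySem.Dict String (List String)) :
    PySem.Dict String (PySem.Set String) :=
  d.keys.foldl
    (fun r a =>
      r.insert a (bReach d ((d.getD a []).length + (d.values.map List.length).sum)
        (d.getD a []) PySem.Set.empty))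
    PySem.Dict.empty



def reachability_matrix_alt (call_g : List (String × List String)) : List (List Int) × List String :=
  ((PySem.Dict.ofList call_g).keys.map (fun i => (PySem.Dict.ofList call_g).keys.map (fun j =>
      if i == j
         || PySem.Set.contains ((bDict (PySem.Dict.ofList call_g)).getD j PySem.Set.empty) i
         || PySem.Set.contains ((bDict (PySem.Dict.ofList call_g)).getD i PySem.Set.empty) j
      then (1 : Int) else 0)),
   (PySem.Dict.ofList call_g).keys)


-- ===== PRECONDITION & SPEC =====
def Spec_reachability_matrix (call_g : List (String × List String)) (out : List (List Int) × List String) : Prop := out = reachability_matrix_alt call_g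
instance (call_g : List (String × List String)) (out : List (List Int) × List String) : Decidable (Spec_reachability_matrix call_g out) := by unfold Spec_reachability_matrix; infer_instance

-- ===== CLAIM (what is proved, stated in full; the proofs are below) =====
def Claim_equal_reachability_matrix : Prop := ∀ (call_g : List (String × List String)), Dom_reachability_matrix call_g → Spec_reachability_matrix call_g (reachability_matrix call_g)

-- ===== LEMMAS AND PROOFS =====
-- Both traversals are proved to compute, per key `a`, exactly the set of nodes
-- reachable from `a` in ≥ 1 step along successor edges (`pvReach`); the matrix
-- entries only test membership of keys in those sets, so the two matrices
-- coincide entry by entry.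

def pvSucc (d : PySem.Dict String (List String)) (x : String) : List String := d.getD x []



def pvReach (d : PySem.Dict String (List String)) (a y : String) : Prop :=
  Relation.TransGen (fun u v => v ∈ pvSucc d u) a y



theorem pvReach_of_succ {d : PySem.Dict String (List String)} {b y : String}
    (h : y ∈ pvSucc d b) : pvReach d b y := Relation.TransGen.single h



theorem pvReach_head {d : PySem.Dict String (List String)} {b c y : String}
    (h : c ∈ pvSucc d b) (h2 : pvReach d c y) : pvReach d b y :=
  Relation.TransGen.head h h2



def pvDeficit (d : PySem.Dict String (List String)) (found : PySem.Set String) : Nat :=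
  (d.keys.filter (fun k => !(PySem.Set.contains found k))).length



def pvWsum (d : PySem.Dict String (List String)) (seen : PySem.Set String) : Nat :=
  ((d.keys.filter (fun k => !(PySem.Set.contains seen k))).map
    (fun k => (pvSucc d k).length)).sum



theorem pvContains_eq (t : PySem.Set String) (k : String) :
    PySem.Set.contains t k = decide (k ∈ t) := by
  simp [PySem.Set.contains_eq_listContains]



theorem pvFilter_decide (K : List String) (s : PySem.Set String) :
    K.filter (fun k => !(PySem.Set.contains s k)) = K.filter (fun k => !decide (k ∈ s)) :=
  List.filter_congr (fun k _ => by rw [pvContains_eq])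



theorem pvLenFilter_mono (K : List String) (s t : PySem.Set String)
    (h : ∀ y ∈ s, y ∈ t) :
    (K.filter (fun k => !decide (k ∈ t))).length ≤ (K.filter (fun k => !decide (k ∈ s))).length := by
  induction K with
  | nil => simp
  | cons a K ih =>
      by_cases ha : a ∈ s
      · simp [ha, h a ha]
        exact ih
      · by_cases hat : a ∈ t <;> simp [ha, hat] <;> omega



theorem pvDeficit_mono (d : PySem.Dict String (List String)) (s t : PySem.Set String)
    (h : ∀ y ∈ s, y ∈ t) : pvDeficit d t ≤ pvDeficit d s := by
  unfold pvDeficit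
  rw [pvFilter_decide, pvFilter_decide]
  exact pvLenFilter_mono _ s t h



theorem pvDeficit_pos (d : PySem.Dict String (List String)) (s : PySem.Set String)
    (b : String) (hb : b ∈ d.keys) (hbs : b ∉ s) : 1 ≤ pvDeficit d s := by
  unfold pvDeficit
  have : b ∈ d.keys.filter (fun k => !(PySem.Set.contains s k)) := by
    simp [List.mem_filter, hb, hbs]
  calc 1 ≤ _ := List.length_pos_of_mem this



theorem pvLenFilter_add_key (K : List String) (s : PySem.Set String) (b : String)
    (hnd : K.Nodup) (hb : b ∈ K) (hbs : b ∉ s) :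
    (K.filter (fun k => !decide (k ∈ s.add b))).length + 1
      = (K.filter (fun k => !decide (k ∈ s))).length := by
  induction K with
  | nil => simp at hb
  | cons a K ih =>
      by_cases hab : a = b
      · subst hab
        have hnotK : a ∉ K := (List.nodup_cons.mp hnd).1
        have he : K.filter (fun k => !decide (k ∈ s.add a))
             = K.filter (fun k => !decide (k ∈ s)) := by
          apply List.filter_congr
          intro k hk
          have : k ≠ a := fun h => hnotK (h ▸ hk)
          simp [PySem.Set.mem_add, this]
        rw [List.filter_cons_of_neg (by simp [PySem.Set.mem_add]),
            List.filter_cons_of_pos (by simp [hbs]), he, List.length_cons]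
      · have hbK : b ∈ K := by
          rcases List.mem_cons.mp hb with h | h
          · exact absurd h.symm hab
          · exact h
        have hnd' := (List.nodup_cons.mp hnd).2
        have h1 : (!decide (a ∈ s.add b)) = (!decide (a ∈ s)) := by
          simp [PySem.Set.mem_add, hab]
        have := ih hnd' hbK
        simp only [List.filter_cons, h1]
        split_ifs with hsp
        · simp only [List.length_cons]; omega
        · omega



theorem pvDeficit_add_key (d : PySem.Dict String (List String)) (s : PySem.Set String)
    (b : String) (hnd : d.keys.Nodup) (hb : b ∈ d.keys) (hbs : b ∉ s) :
    pvDeficit d (s.add b) + 1 = pvDeficit d s := by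
  unfold pvDeficit
  rw [pvFilter_decide, pvFilter_decide]
  exact pvLenFilter_add_key _ s b hnd hb hbs



theorem pvSumFilter_add_key (K : List String) (g : String → Nat) (s : PySem.Set String)
    (b : String) (hnd : K.Nodup) (hb : b ∈ K) (hbs : b ∉ s) :
    ((K.filter (fun k => !decide (k ∈ s.add b))).map g).sum + g b
      = ((K.filter (fun k => !decide (k ∈ s))).map g).sum := by
  induction K with
  | nil => simp at hb
  | cons a K ih =>
      by_cases hab : a = b
      · subst hab
        have hnotK : a ∉ K := (List.nodup_cons.mp hnd).1
        have he : K.filter (fun k => !decide (k ∈ s.add a))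
             = K.filter (fun k => !decide (k ∈ s)) := by
          apply List.filter_congr
          intro k hk
          have : k ≠ a := fun h => hnotK (h ▸ hk)
          simp [PySem.Set.mem_add, this]
        rw [List.filter_cons_of_neg (by simp [PySem.Set.mem_add]),
            List.filter_cons_of_pos (by simp [hbs]), he, List.map_cons, List.sum_cons]
        omega
      · have hbK : b ∈ K := by
          rcases List.mem_cons.mp hb with h | h
          · exact absurd h.symm hab
          · exact h
        have hnd' := (List.nodup_cons.mp hnd).2
        have h1 : (!decide (a ∈ s.add b)) = (!decide (a ∈ s)) := by
          simp [PySem.Set.mem_add, hab]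
        have := ih hnd' hbK
        simp only [List.filter_cons, h1]
        split_ifs with hsp
        · simp only [List.map_cons, List.sum_cons]; omega
        · omega



theorem pvWsum_add_key (d : PySem.Dict String (List String)) (s : PySem.Set String)
    (b : String) (hnd : d.keys.Nodup) (hb : b ∈ d.keys) (hbs : b ∉ s) :
    pvWsum d (s.add b) + (pvSucc d b).length = pvWsum d s := by
  unfold pvWsum
  rw [pvFilter_decide, pvFilter_decide]
  exact pvSumFilter_add_key _ _ s b hnd hb hbs



theorem pvWsum_add_nonkey (d : PySem.Dict String (List String)) (s : PySem.Set String)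
    (b : String) (hb : b ∉ d.keys) :
    pvWsum d (s.add b) = pvWsum d s := by
  unfold pvWsum
  have he : d.keys.filter (fun k => !(PySem.Set.contains (s.add b) k))
       = d.keys.filter (fun k => !(PySem.Set.contains s k)) := by
    apply List.filter_congr
    intro k hk
    have : k ≠ b := fun h => hb (h ▸ hk)
    simp [PySem.Set.mem_add, this]
  rw [he]



theorem findReach_mono (d : PySem.Dict String (List String)) (fuel : Nat) (L : List String)
    (memo : PySem.Dict String (PySem.Set String)) (found : PySem.Set String) :
    ∀ y ∈ found, y ∈ findReach d fuel L memo found := by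
  fun_induction findReach with
  | case1 => intro y hy; exact hy
  | case2 => rename_i ih; exact ih
  | case3 =>
      rename_i ih
      intro y hy
      exact ih y ((PySem.Set.mem_update _ _ _).mpr (Or.inl ((PySem.Set.mem_add _ _ _).mpr (Or.inl hy))))
  | case4 => intro y hy; exact (PySem.Set.mem_add _ _ _).mpr (Or.inl hy)
  | case5 => rename_i ih1 ih2; intro y hy; exact ih2 y (ih1 y ((PySem.Set.mem_add _ _ _).mpr (Or.inl hy)))
  | case6 => rename_i ih; intro y hy; exact ih y ((PySem.Set.mem_add _ _ _).mpr (Or.inl hy))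



theorem findReach_sound (d : PySem.Dict String (List String)) (fuel : Nat) (L : List String)
    (memo : PySem.Dict String (PySem.Set String)) (found : PySem.Set String)
    (hm : ∀ k s, memo.get? k = some s → ∀ y ∈ s, pvReach d k y) :
    ∀ y ∈ findReach d fuel L memo found,
      y ∈ found ∨ ∃ b ∈ L, y = b ∨ pvReach d b y := by
  fun_induction findReach with
  | case1 => intro y hy; exact Or.inl hy
  | case2 =>
      rename_i b rest h ih
      intro y hy
      rcases ih y hy with h1 | ⟨c, hc, h2⟩
      · exact Or.inl h1
      · exact Or.inr ⟨c, List.mem_cons_of_mem _ hc, h2⟩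
  | case3 =>
      rename_i b rest h hk s hs ih
      intro y hy
      rcases ih y hy with h1 | ⟨c, hc, h2⟩
      · rcases (PySem.Set.mem_update _ _ _).mp h1 with h3 | h3
        · rcases (PySem.Set.mem_add _ _ _).mp h3 with h4 | h4
          · exact Or.inl h4
          · exact Or.inr ⟨b, List.mem_cons_self, Or.inl h4⟩
        · exact Or.inr ⟨b, List.mem_cons_self, Or.inr (hm b s hs y h3)⟩
      · exact Or.inr ⟨c, List.mem_cons_of_mem _ hc, h2⟩
  | case4 =>
      rename_i b rest h hk hmm
      intro y hy
      rcases (PySem.Set.mem_add _ _ _).mp hy with h4 | h4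
      · exact Or.inl h4
      · exact Or.inr ⟨b, List.mem_cons_self, Or.inl h4⟩
  | case5 =>
      rename_i b rest h hk hmm f ih1 ih2
      intro y hy
      rcases ih2 y hy with h1 | ⟨c, hc, h2⟩
      · rcases ih1 y h1 with h3 | ⟨c, hc, h2⟩
        · rcases (PySem.Set.mem_add _ _ _).mp h3 with h4 | h4
          · exact Or.inl h4
          · exact Or.inr ⟨b, List.mem_cons_self, Or.inl h4⟩
        · refine Or.inr ⟨b, List.mem_cons_self, Or.inr ?_⟩
          rcases h2 with rfl | h2
          · exact pvReach_of_succ hc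
          · exact pvReach_head hc h2
      · exact Or.inr ⟨c, List.mem_cons_of_mem _ hc, h2⟩
  | case6 =>
      rename_i b rest h hk ih
      intro y hy
      rcases ih y hy with h1 | ⟨c, hc, h2⟩
      · rcases (PySem.Set.mem_add _ _ _).mp h1 with h4 | h4
        · exact Or.inl h4
        · exact Or.inr ⟨b, List.mem_cons_self, Or.inl h4⟩
      · exact Or.inr ⟨c, List.mem_cons_of_mem _ hc, h2⟩



theorem findReach_complete (d : PySem.Dict String (List String)) (fuel : Nat) (L : List String)
    (memo : PySem.Dict String (PySem.Set String)) (found : PySem.Set String)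
    (hnd : d.keys.Nodup)
    (hm1 : ∀ k s, memo.get? k = some s → ∀ y ∈ s, ∀ c ∈ pvSucc d y, c ∈ s)
    (hm2 : ∀ k s, memo.get? k = some s → ∀ c ∈ pvSucc d k, c ∈ s) :
    pvDeficit d found ≤ fuel →
    (∀ b ∈ L, b ∈ findReach d fuel L memo found) ∧
    (∀ x ∈ findReach d fuel L memo found, x ∉ found →
      ∀ c ∈ pvSucc d x, c ∈ findReach d fuel L memo found) := by
  fun_induction findReach with
  | case1 =>
      intro _
      exact ⟨fun b hb => absurd hb (List.not_mem_nil), fun x hx hnx => absurd hx hnx⟩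
  | case2 =>
      rename_i found b rest h ih
      intro hf
      obtain ⟨ih1, ih2⟩ := ih hf
      refine ⟨?_, ih2⟩
      intro c hc
      rcases List.mem_cons.mp hc with rfl | hc
      · exact findReach_mono _ _ _ _ _ c ((PySem.Set.contains_iff _ _).mp h)
      · exact ih1 c hc
  | case3 =>
      rename_i found b rest h hk s hs ih
      intro hf
      have hsub : ∀ y ∈ found, y ∈ PySem.Set.update (found.add b) s := fun y hy =>
        (PySem.Set.mem_update _ _ _).mpr (Or.inl ((PySem.Set.mem_add _ _ _).mpr (Or.inl hy)))
      obtain ⟨ih1, ih2⟩ := ih (le_trans (pvDeficit_mono d _ _ hsub) hf)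
      constructor
      · intro c hc
        rcases List.mem_cons.mp hc with rfl | hc
        · exact findReach_mono _ _ _ _ _ c
            ((PySem.Set.mem_update _ _ _).mpr (Or.inl ((PySem.Set.mem_add _ _ _).mpr (Or.inr rfl))))
        · exact ih1 c hc
      · intro x hx hnx c hc
        by_cases hxf : x ∈ PySem.Set.update (found.add b) s
        · have hcs : c ∈ s := by
            rcases (PySem.Set.mem_update _ _ _).mp hxf with h3 | h3
            · rcases (PySem.Set.mem_add _ _ _).mp h3 with h4 | h4
              · exact absurd h4 hnx
              · exact hm2 b s hs c (h4 ▸ hc)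
            · exact hm1 b s hs x h3 c hc
          exact findReach_mono _ _ _ _ _ c ((PySem.Set.mem_update _ _ _).mpr (Or.inr hcs))
        · exact ih2 x hx hxf c hc
  | case4 =>
      rename_i found b rest h hk hmm
      intro hf
      have hb : b ∈ d.keys := (PySem.Dict.contains_iff_mem_keys _ _).mp hk
      have hnb : b ∉ found := fun hbf => h ((PySem.Set.contains_iff _ _).mpr hbf)
      have := pvDeficit_pos d found b hb hnb
      omega
  | case5 =>
      rename_i found b rest h hk hmm f ihI ihO
      intro hf
      have hb : b ∈ d.keys := (PySem.Dict.contains_iff_mem_keys _ _).mp hk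
      have hnb : b ∉ found := fun hbf => h ((PySem.Set.contains_iff _ _).mpr hbf)
      have hdec := pvDeficit_add_key d found b hnd hb hnb
      obtain ⟨i1C1, i1C2⟩ := ihI (by omega)
      have hsub1 : ∀ y ∈ found.add b, y ∈ findReach d f (d.getD b []) memo (found.add b) :=
        findReach_mono _ _ _ _ _
      have hdef1 : pvDeficit d (findReach d f (d.getD b []) memo (found.add b)) ≤ f + 1 :=
        le_trans (le_trans (pvDeficit_mono d _ _ hsub1) (by omega)) (Nat.le_succ f)
      obtain ⟨i2C1, i2C2⟩ := ihO hdef1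
      constructor
      · intro c hc
        rcases List.mem_cons.mp hc with rfl | hc
        · exact findReach_mono _ _ _ _ _ c
            (hsub1 c ((PySem.Set.mem_add _ _ _).mpr (Or.inr rfl)))
        · exact i2C1 c hc
      · intro x hx hnx c hc
        by_cases hxr : x ∈ findReach d f (d.getD b []) memo (found.add b)
        · by_cases hxf1 : x ∈ found.add b
          · have hxb : x = b := by
              rcases (PySem.Set.mem_add _ _ _).mp hxf1 with h4 | h4
              · exact absurd h4 hnx
              · exact h4
            subst hxb
            exact findReach_mono _ _ _ _ _ c (i1C1 c hc)
          · exact findReach_mono _ _ _ _ _ c (i1C2 x hxr hxf1 c hc)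
        · exact i2C2 x hx hxr c hc
  | case6 =>
      rename_i found b rest h hk ih
      intro hf
      have hsub : ∀ y ∈ found, y ∈ found.add b := fun y hy =>
        (PySem.Set.mem_add _ _ _).mpr (Or.inl hy)
      obtain ⟨ih1, ih2⟩ := ih (le_trans (pvDeficit_mono d _ _ hsub) hf)
      constructor
      · intro c hc
        rcases List.mem_cons.mp hc with rfl | hc
        · exact findReach_mono _ _ _ _ _ c ((PySem.Set.mem_add _ _ _).mpr (Or.inr rfl))
        · exact ih1 c hc
      · intro x hx hnx c hc
        by_cases hxf : x ∈ found.add b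
        · have hxb : x = b := by
            rcases (PySem.Set.mem_add _ _ _).mp hxf with h4 | h4
            · exact absurd h4 hnx
            · exact h4
          subst hxb
          have : pvSucc d x = [] := by
            unfold pvSucc
            exact PySem.Dict.getD_of_not_contains _ _ (Bool.eq_false_iff.mpr hk)
          rw [this] at hc
          exact absurd hc (List.not_mem_nil)
        · exact ih2 x hx hxf c hc



theorem bReach_mono (d : PySem.Dict String (List String)) (fuel : Nat) (work : List String)
    (seen : PySem.Set String) : ∀ y ∈ seen, y ∈ bReach d fuel work seen := by
  fun_induction bReach with
  | case1 => intro y hy; exact hy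
  | case2 => intro y hy; exact hy
  | case3 => rename_i ih; exact ih
  | case4 => rename_i ih; intro y hy; exact ih y ((PySem.Set.mem_add _ _ _).mpr (Or.inl hy))
  | case5 => rename_i ih; intro y hy; exact ih y ((PySem.Set.mem_add _ _ _).mpr (Or.inl hy))



theorem bReach_sound (d : PySem.Dict String (List String)) (fuel : Nat) (work : List String)
    (seen : PySem.Set String) :
    ∀ y ∈ bReach d fuel work seen,
      y ∈ seen ∨ ∃ b ∈ work, y = b ∨ pvReach d b y := by
  fun_induction bReach with
  | case1 => intro y hy; exact Or.inl hy
  | case2 => intro y hy; exact Or.inl hy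
  | case3 =>
      rename_i f b work' h ih
      intro y hy
      rcases ih y hy with h1 | ⟨c, hc, h2⟩
      · exact Or.inl h1
      · exact Or.inr ⟨c, List.mem_cons_of_mem _ hc, h2⟩
  | case4 =>
      rename_i seen f b work' h hk ih
      intro y hy
      rcases ih y hy with h1 | ⟨c, hc, h2⟩
      · rcases (PySem.Set.mem_add _ _ _).mp h1 with h4 | h4
        · exact Or.inl h4
        · exact Or.inr ⟨b, List.mem_cons_self, Or.inl h4⟩
      · rcases List.mem_append.mp hc with hc | hc
        · exact Or.inr ⟨c, List.mem_cons_of_mem _ hc, h2⟩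
        · refine Or.inr ⟨b, List.mem_cons_self, Or.inr ?_⟩
          rcases h2 with rfl | h2
          · exact pvReach_of_succ hc
          · exact pvReach_head hc h2
  | case5 =>
      rename_i f b work' h hk ih
      intro y hy
      rcases ih y hy with h1 | ⟨c, hc, h2⟩
      · rcases (PySem.Set.mem_add _ _ _).mp h1 with h4 | h4
        · exact Or.inl h4
        · exact Or.inr ⟨b, List.mem_cons_self, Or.inl h4⟩
      · exact Or.inr ⟨c, List.mem_cons_of_mem _ hc, h2⟩



theorem bReach_complete (d : PySem.Dict String (List String)) (fuel : Nat) (work : List String)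
    (seen : PySem.Set String) (hnd : d.keys.Nodup) :
    work.length + pvWsum d seen ≤ fuel →
    (∀ b ∈ work, b ∈ bReach d fuel work seen) ∧
    (∀ x ∈ bReach d fuel work seen, x ∉ seen →
      ∀ c ∈ pvSucc d x, c ∈ bReach d fuel work seen) := by
  fun_induction bReach with
  | case1 =>
      intro _
      exact ⟨fun b hb => absurd hb (List.not_mem_nil), fun x hx hnx => absurd hx hnx⟩
  | case2 =>
      rename_i work seen h
      intro hf
      exact absurd (List.length_eq_zero_iff.mp (by omega : work.length = 0)) h
  | case3 =>
      rename_i seen f b work' h ih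
      intro hf
      obtain ⟨ih1, ih2⟩ := ih (by simp at hf; omega)
      refine ⟨?_, ih2⟩
      intro c hc
      rcases List.mem_cons.mp hc with rfl | hc
      · exact bReach_mono _ _ _ _ c ((PySem.Set.contains_iff _ _).mp h)
      · exact ih1 c hc
  | case4 =>
      rename_i seen f b work' h hk ih
      have hb : b ∈ d.keys := (PySem.Dict.contains_iff_mem_keys _ _).mp hk
      have hnb : b ∉ seen := fun hbf => h ((PySem.Set.contains_iff _ _).mpr hbf)
      have hkey := pvWsum_add_key d seen b hnd hb hnb
      intro hf
      obtain ⟨ih1, ih2⟩ := ih (by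
        simp only [List.length_append, List.length_cons] at hf ⊢
        unfold pvSucc at hkey
        omega)
      constructor
      · intro c hc
        rcases List.mem_cons.mp hc with rfl | hc
        · exact bReach_mono _ _ _ _ c ((PySem.Set.mem_add _ _ _).mpr (Or.inr rfl))
        · exact ih1 c (List.mem_append.mpr (Or.inl hc))
      · intro x hx hnx c hc
        by_cases hxs : x ∈ seen.add b
        · have hxb : x = b := by
            rcases (PySem.Set.mem_add _ _ _).mp hxs with h4 | h4
            · exact absurd h4 hnx
            · exact h4
          subst hxb
          exact ih1 c (List.mem_append.mpr (Or.inr hc))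
        · exact ih2 x hx hxs c hc
  | case5 =>
      rename_i seen f b work' h hk ih
      have hb : b ∉ d.keys := fun hbk => hk ((PySem.Dict.contains_iff_mem_keys _ _).mpr hbk)
      intro hf
      obtain ⟨ih1, ih2⟩ := ih (by
        rw [pvWsum_add_nonkey d seen b hb]
        simp at hf
        omega)
      constructor
      · intro c hc
        rcases List.mem_cons.mp hc with rfl | hc
        · exact bReach_mono _ _ _ _ c ((PySem.Set.mem_add _ _ _).mpr (Or.inr rfl))
        · exact ih1 c hc
      · intro x hx hnx c hc
        by_cases hxs : x ∈ seen.add b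
        · have hxb : x = b := by
            rcases (PySem.Set.mem_add _ _ _).mp hxs with h4 | h4
            · exact absurd h4 hnx
            · exact h4
          subst hxb
          have : pvSucc d x = [] := by
            unfold pvSucc
            exact PySem.Dict.getD_of_not_contains _ _ (Bool.eq_false_iff.mpr hk)
          rw [this] at hc
          exact absurd hc (List.not_mem_nil)
        · exact ih2 x hx hxs c hc



theorem findReach_char (d : PySem.Dict String (List String)) (fuel : Nat)
    (memo : PySem.Dict String (PySem.Set String)) (hnd : d.keys.Nodup)
    (hm : ∀ k s, memo.get? k = some s → ∀ y, y ∈ s ↔ pvReach d k y)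
    (a : String) (hf : pvDeficit d PySem.Set.empty ≤ fuel) :
    ∀ y, y ∈ findReach d fuel (d.getD a []) memo PySem.Set.empty ↔ pvReach d a y := by
  intro y
  constructor
  · intro hy
    rcases findReach_sound d fuel (d.getD a []) memo PySem.Set.empty
        (fun k s hs z hz => (hm k s hs z).mp hz) y hy with h1 | ⟨b, hb, h2⟩
    · exact absurd h1 (by simp [PySem.Set.empty])
    · rcases h2 with rfl | h2
      · exact pvReach_of_succ hb
      · exact pvReach_head hb h2
  · intro hy
    obtain ⟨C1, C2⟩ := findReach_complete d fuel (d.getD a []) memo PySem.Set.empty hnd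
      (fun k s hs z hz c hc => (hm k s hs c).mpr (Relation.TransGen.tail ((hm k s hs z).mp hz) hc))
      (fun k s hs c hc => (hm k s hs c).mpr (pvReach_of_succ hc)) hf
    induction hy with
    | single hb => exact C1 _ hb
    | tail h1 hstep ih => exact C2 _ ih (by simp [PySem.Set.empty]) _ hstep



theorem bReach_char (d : PySem.Dict String (List String)) (fuel : Nat) (hnd : d.keys.Nodup)
    (a : String) (hf : (d.getD a []).length + pvWsum d PySem.Set.empty ≤ fuel) :
    ∀ y, y ∈ bReach d fuel (d.getD a []) PySem.Set.empty ↔ pvReach d a y := by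
  intro y
  constructor
  · intro hy
    rcases bReach_sound d fuel (d.getD a []) PySem.Set.empty y hy with h1 | ⟨b, hb, h2⟩
    · exact absurd h1 (by simp [PySem.Set.empty])
    · rcases h2 with rfl | h2
      · exact pvReach_of_succ hb
      · exact pvReach_head hb h2
  · intro hy
    obtain ⟨C1, C2⟩ := bReach_complete d fuel (d.getD a []) PySem.Set.empty hnd hf
    induction hy with
    | single hb => exact C1 _ hb
    | tail h1 hstep ih => exact C2 _ ih (by simp [PySem.Set.empty]) _ hstep



theorem pvDeficit_empty_le (d : PySem.Dict String (List String)) :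
    pvDeficit d PySem.Set.empty ≤ d.size := by
  unfold pvDeficit
  have h1 : d.size = d.keys.length := by simp [PySem.Dict.keys, PySem.Dict.size]
  rw [h1]
  exact List.length_filter_le _ _



theorem pvWsum_empty (d : PySem.Dict String (List String)) (hnd : d.keys.Nodup) :
    pvWsum d PySem.Set.empty = (d.values.map List.length).sum := by
  unfold pvWsum
  rw [PySem.Dict.values_eq_map_keys d hnd []]
  have h1 : d.keys.filter (fun k => !(PySem.Set.contains PySem.Set.empty k)) = d.keys := by
    rw [List.filter_congr (fun k _ => by simp [PySem.Set.contains_eq_listContains, PySem.Set.empty] : ∀ k ∈ d.keys, _ = true)]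
    exact List.filter_true _
  rw [h1, List.map_map]
  rfl



theorem reachDict_exact (d : PySem.Dict String (List String)) (hnd : d.keys.Nodup) :
    ∀ k s, (reachDict d).get? k = some s → ∀ y, y ∈ s ↔ pvReach d k y := by
  unfold reachDict
  suffices h : ∀ (ks : List String) (m0 : PySem.Dict String (PySem.Set String)),
      (∀ k s, m0.get? k = some s → ∀ y, y ∈ s ↔ pvReach d k y) →
      ∀ k s, (ks.foldl (fun memo a =>
          memo.insert a (findReach d d.size (d.getD a []) memo PySem.Set.empty)) m0).get? k = some s →
        ∀ y, y ∈ s ↔ pvReach d k y by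
    exact h d.keys PySem.Dict.empty (by simp [PySem.Dict.get?_empty])
  intro ks
  induction ks with
  | nil => intro m0 hQ; exact hQ
  | cons a ks ih =>
      intro m0 hQ
      simp only [List.foldl_cons]
      apply ih
      intro k s hks y
      rw [PySem.Dict.get?_insert] at hks
      by_cases hka : k = a
      · rw [if_pos hka] at hks
        subst hka
        cases hks
        exact findReach_char d d.size m0 hnd hQ k (pvDeficit_empty_le d) y
      · rw [if_neg hka] at hks
        exact hQ k s hks y



theorem bDict_exact (d : PySem.Dict String (List String)) (hnd : d.keys.Nodup) :
    ∀ k s, (bDict d).get? k = some s → ∀ y, y ∈ s ↔ pvReach d k y := by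
  unfold bDict
  suffices h : ∀ (ks : List String) (m0 : PySem.Dict String (PySem.Set String)),
      (∀ k s, m0.get? k = some s → ∀ y, y ∈ s ↔ pvReach d k y) →
      ∀ k s, (ks.foldl (fun r a =>
          r.insert a (bReach d ((d.getD a []).length + (d.values.map List.length).sum)
            (d.getD a []) PySem.Set.empty)) m0).get? k = some s →
        ∀ y, y ∈ s ↔ pvReach d k y by
    exact h d.keys PySem.Dict.empty (by simp [PySem.Dict.get?_empty])
  intro ks
  induction ks with
  | nil => intro m0 hQ; exact hQ
  | cons a ks ih =>
      intro m0 hQ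
      simp only [List.foldl_cons]
      apply ih
      intro k s hks y
      rw [PySem.Dict.get?_insert] at hks
      by_cases hka : k = a
      · rw [if_pos hka] at hks
        subst hka
        cases hks
        exact bReach_char d _ hnd k (by rw [pvWsum_empty d hnd]) y
      · rw [if_neg hka] at hks
        exact hQ k s hks y



theorem reachDict_keys (d : PySem.Dict String (List String)) (hnd : d.keys.Nodup) :
    (reachDict d).keys = d.keys := by
  unfold reachDict
  rw [PySem.Dict.keys_foldl_insert]
  rw [PySem.Dict.keys_empty, PySem.Set.update_nil_left, PySem.Set.ofList_eq_self_of_nodup _ hnd]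



theorem bDict_keys (d : PySem.Dict String (List String)) (hnd : d.keys.Nodup) :
    (bDict d).keys = d.keys := by
  unfold bDict
  rw [PySem.Dict.keys_foldl_insert]
  rw [PySem.Dict.keys_empty, PySem.Set.update_nil_left, PySem.Set.ofList_eq_self_of_nodup _ hnd]



theorem pvGetD_mem (d : PySem.Dict String (List String))
    (r : PySem.Dict String (PySem.Set String))
    (hr : ∀ k s, r.get? k = some s → ∀ y, y ∈ s ↔ pvReach d k y)
    (hk : r.keys = d.keys) (j : String) (hj : j ∈ d.keys) (y : String) :
    y ∈ r.getD j PySem.Set.empty ↔ pvReach d j y := by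
  cases hg : r.get? j with
  | none =>
      have := (PySem.Dict.get?_eq_none_iff_contains _ _).mp hg
      rw [← hk] at hj
      rw [(PySem.Dict.contains_iff_mem_keys _ _).mpr hj] at this
      cases this
  | some s =>
      rw [PySem.Dict.getD_of_get?_eq_some _ _ hg]
      exact hr j s hg y



theorem pvEntry_eq (d : PySem.Dict String (List String)) (hnd : d.keys.Nodup)
    (i j : String) (hi : i ∈ d.keys) (hj : j ∈ d.keys) :
    (if PySem.Set.contains ((reachDict d).getD j PySem.Set.empty) i
        || PySem.Set.contains ((reachDict d).getD i PySem.Set.empty) j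
        || i == j then (1 : Int) else 0)
    = (if i == j
          || PySem.Set.contains ((bDict d).getD j PySem.Set.empty) i
          || PySem.Set.contains ((bDict d).getD i PySem.Set.empty) j then (1 : Int) else 0) := by
  have e1 := pvGetD_mem d (reachDict d) (reachDict_exact d hnd) (reachDict_keys d hnd) j hj i
  have e2 := pvGetD_mem d (reachDict d) (reachDict_exact d hnd) (reachDict_keys d hnd) i hi j
  have e3 := pvGetD_mem d (bDict d) (bDict_exact d hnd) (bDict_keys d hnd) j hj i
  have e4 := pvGetD_mem d (bDict d) (bDict_exact d hnd) (bDict_keys d hnd) i hi j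
  have hcond : (PySem.Set.contains ((reachDict d).getD j PySem.Set.empty) i
        || PySem.Set.contains ((reachDict d).getD i PySem.Set.empty) j
        || i == j)
      = (i == j
          || PySem.Set.contains ((bDict d).getD j PySem.Set.empty) i
          || PySem.Set.contains ((bDict d).getD i PySem.Set.empty) j) := by
    have h1 := e1.trans e3.symm
    have h2 := e2.trans e4.symm
    rw [Bool.eq_iff_iff]
    simp only [Bool.or_eq_true, pvContains_eq, decide_eq_true_eq, beq_iff_eq]
    tauto
  rw [hcond]



theorem pv_main (call_g : List (String × List String)) :
    reachability_matrix call_g = reachability_matrix_alt call_g := by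
  have hnd := PySem.Dict.nodup_keys_ofList call_g
  unfold reachability_matrix reachability_matrix_alt
  rw [reachDict_keys _ hnd]
  refine Prod.ext ?_ rfl
  rw [PySem.List.foldl_append_singleton_eq_map
    (fun i => (PySem.Dict.ofList call_g).keys.foldl (fun row j =>
      row ++ [if PySem.Set.contains ((reachDict (PySem.Dict.ofList call_g)).getD j PySem.Set.empty) i
                 || PySem.Set.contains ((reachDict (PySem.Dict.ofList call_g)).getD i PySem.Set.empty) j
                 || i == j then (1 : Int) else 0]) [])]
  simp only [List.nil_append]
  apply List.map_congr_left
  intro i hi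
  rw [PySem.List.foldl_append_singleton_eq_map
    (fun j => if PySem.Set.contains ((reachDict (PySem.Dict.ofList call_g)).getD j PySem.Set.empty) i
                 || PySem.Set.contains ((reachDict (PySem.Dict.ofList call_g)).getD i PySem.Set.empty) j
                 || i == j then (1 : Int) else 0)]
  simp only [List.nil_append]
  apply List.map_congr_left
  intro j hj
  exact pvEntry_eq _ hnd i j hi hj



-- ===== VERDICT (by name: the statement is the Claim_ definition above) =====
theorem reachability_matrix_spec : Claim_equal_reachability_matrix := by
  intro call_g _
  exact pv_main call_g
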